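-- pv_equiv track=rewrite | github.com/obtusa07/algorithm | 프로그래머스/lv1/131128. 숫자 짝꿍/숫자 짝꿍.py | solution
-- ===== SOURCE A (Python) =====
-- def solution(X, Y):
--     answer = ''
--     for i in range(0, 10):
--         answer += (str(i) * min(X.count(str(i)), Y.count(str(i))))
--
--     if answer == '':
--         return '-1'
--     if answer.count("0") == len(answer):
--         return '0'
--     return answer[::-1]
-- ===== SOURCE B (Python) =====
-- def solution(X, Y):
--     # Different algorithm: sort the digit characters of each string in descending
--     # order, then intersect the two sorted multisets with a two-pointer merge,
--     # which emits the shared digits already in descending order.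
--     xs = sorted((c for c in X if c.isdigit()), reverse=True)
--     ys = sorted((c for c in Y if c.isdigit()), reverse=True)
--     out = []
--     i = j = 0
--     while i < len(xs) and j < len(ys):
--         a, b = xs[i], ys[j]
--         if a == b:
--             out.append(a)
--             i += 1
--             j += 1
--         elif a > b:
--             i += 1
--         else:
--             j += 1
--     if not out:
--         return '-1'
--     if out[0] == '0':
--         return '0'
--     return ''.join(out)
-- ===== Notes on version B (the rewrite author's own statement) =====
-- stated objective: alternative
-- what changed: Replaces A's ten full-string .count scans and ascending-build-then-reverse with a sort of each string's digit characters in descending order followed by a two-pointer multiset-intersection merge of the two sorted lists, which emits the shared digits already in descending order; sentinels are read off the merge result (empty -> '-1', leading '0' -> '0').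
import Mathlib
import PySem

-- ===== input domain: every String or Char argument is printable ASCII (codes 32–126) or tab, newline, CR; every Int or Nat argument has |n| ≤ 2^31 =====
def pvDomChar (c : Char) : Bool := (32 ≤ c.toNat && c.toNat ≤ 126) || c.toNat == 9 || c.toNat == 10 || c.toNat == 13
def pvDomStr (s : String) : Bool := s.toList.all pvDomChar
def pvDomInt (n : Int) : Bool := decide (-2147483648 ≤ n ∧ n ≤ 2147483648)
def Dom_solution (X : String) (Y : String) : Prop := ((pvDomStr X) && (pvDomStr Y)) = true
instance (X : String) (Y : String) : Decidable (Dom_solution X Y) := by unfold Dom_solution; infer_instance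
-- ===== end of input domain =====

-- B replaces A's ten full-string .count scans and ascending-build-then-reverse by a
-- sort of each string's digits in descending order followed by a two-pointer multiset
-- intersection of the two sorted lists (alternative algorithm, same sentinels).

-- ===== PORT A =====
def solution (X : String) (Y : String) : String :=
  -- answer = ''; for i in range(0, 10): answer += str(i) * min(X.count(str(i)), Y.count(str(i)))
  let answer : List Char :=
    (PySem.List.pyRange 0 10 1).foldl
      (fun acc i =>
        acc ++ PySem.List.pyRepeat (PySem.Int.toStr i).toList
          (min (PySem.Str.count X (PySem.Int.toStr i) : Int)
               (PySem.Str.count Y (PySem.Int.toStr i) : Int))) []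
  if answer = [] then "-1"                                              -- if answer == '': return '-1'
  else if PySem.Chars.count answer "0".toList = answer.length then "0"  -- if answer.count("0") == len(answer): return '0'
  else String.ofList answer.reverse                                     -- answer[::-1] (reverse; PySem.Chars.slice?_none_none_neg_one)

-- ===== PORT B =====
-- the while loop with two index pointers i, j over xs, ys; a = xs[i], b = ys[j]
def pvMergeInter : List Char → List Char → List Char
  | [], _ => []
  | _ :: _, [] => []
  | a :: xs, b :: ys =>
    if a = b then a :: pvMergeInter xs ys          -- append a; i += 1; j += 1
    else if b < a then pvMergeInter xs (b :: ys)   -- elif a > b: i += 1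
    else pvMergeInter (a :: xs) ys                 -- else: j += 1
termination_by xs ys => xs.length + ys.length
decreasing_by all_goals (simp; try omega)

def solution_alt (X : String) (Y : String) : String :=
  -- c.isdigit() for a printable-ASCII char is exactly '0' ≤ c ≤ '9' (hand-ported, exact on Dom)
  let xs := PySem.List.sorted (X.toList.filter fun c => decide ('0' ≤ c ∧ c ≤ '9')) (fun c => c) true
  let ys := PySem.List.sorted (Y.toList.filter fun c => decide ('0' ≤ c ∧ c ≤ '9')) (fun c => c) true
  let out := pvMergeInter xs ys
  match out with
  | [] => "-1"                                         -- if not out: return '-1'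
  | c :: _ => if c = '0' then "0"                      -- if out[0] == '0': return '0'
              else String.ofList out                   -- return ''.join(out)

-- ===== PRECONDITION & SPEC =====
def Spec_solution (X : String) (Y : String) (out : String) : Prop := out = solution_alt X Y
instance (X : String) (Y : String) (out : String) : Decidable (Spec_solution X Y out) := by unfold Spec_solution; infer_instance

-- ===== CLAIM (what is proved, stated in full; the proofs are below) =====
def Claim_equal_solution : Prop := ∀ (X : String) (Y : String), Dom_solution X Y → Spec_solution X Y (solution X Y)

-- ===== LEMMAS AND PROOFS =====

-- blocks of repeated digits, one block per digit of ds (proof-side helper)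
def blocksOf : List Char → (Char → Nat) → List Char
  | [], _ => []
  | c :: ds, f => List.replicate (f c) c ++ blocksOf ds f

theorem mem_blocksOf {x : Char} {ds : List Char} {f : Char → Nat} (h : x ∈ blocksOf ds f) : x ∈ ds := by
  induction ds with
  | nil => simp [blocksOf] at h
  | cons c ds ih =>
    simp only [blocksOf, List.mem_append, List.mem_replicate] at h
    rcases h with ⟨-, rfl⟩ | h
    · exact List.mem_cons_self
    · exact List.mem_cons_of_mem _ (ih h)

-- Python s.count(sub) with a single-character sub is plain character counting
theorem go_single (c : Char) (fuel : Nat) : ∀ (l : List Char) (acc : Nat), l.length ≤ fuel →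
    PySem.Chars.count.go [c] fuel l acc = acc + l.count c := by
  induction fuel with
  | zero => intro l acc h
            cases l with
            | nil => simp [PySem.Chars.count.go]
            | cons x t => simp at h
  | succ n ih =>
    intro l acc h
    cases l with
    | nil => simp [PySem.Chars.count.go]
    | cons x t =>
      simp only [PySem.Chars.count.go]
      by_cases hx : c = x
      · subst hx
        simp only [List.isPrefixOf, BEq.rfl, Bool.true_and, if_true]
        rw [show List.drop (List.length [c]) (c :: t) = t by simp]
        rw [ih t (acc+1) (by simpa using h)]
        simp
        omega
      · have hp : ([c].isPrefixOf (x :: t)) = false := by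
          simp [List.isPrefixOf]; exact fun h' => hx h'
        rw [hp]
        simp only [Bool.false_eq_true, if_false]
        rw [ih t acc (by simpa using h)]
        simp [List.count_cons]
        intro h'; exact absurd h'.symm hx

theorem chars_count_single (s : List Char) (c : Char) :
    PySem.Chars.count s [c] = s.count c := by
  simp [PySem.Chars.count]
  rw [go_single c s.length s 0 le_rfl]
  simp

theorem min_natCast_toNat (a b : Nat) : (min (a : Int) (b : Int)).toNat = min a b := by omega

theorem pyRange_ten : PySem.List.pyRange 0 10 1 = [0,1,2,3,4,5,6,7,8,9] := by decide

-- A's result, written over the ten shared digit counts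
theorem solution_eq (X Y : String) :
    solution X Y =
    (let answer : List Char :=
      blocksOf ['0','1','2','3','4','5','6','7','8','9']
        (fun c => min (X.toList.count c) (Y.toList.count c))
     if answer = [] then "-1"
     else if answer.count '0' = answer.length then "0"
     else String.ofList answer.reverse) := by
  have ht0 : (PySem.Int.toStr 0).toList = ['0'] := by decide
  have ht1 : (PySem.Int.toStr 1).toList = ['1'] := by decide
  have ht2 : (PySem.Int.toStr 2).toList = ['2'] := by decide
  have ht3 : (PySem.Int.toStr 3).toList = ['3'] := by decide
  have ht4 : (PySem.Int.toStr 4).toList = ['4'] := by decide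
  have ht5 : (PySem.Int.toStr 5).toList = ['5'] := by decide
  have ht6 : (PySem.Int.toStr 6).toList = ['6'] := by decide
  have ht7 : (PySem.Int.toStr 7).toList = ['7'] := by decide
  have ht8 : (PySem.Int.toStr 8).toList = ['8'] := by decide
  have ht9 : (PySem.Int.toStr 9).toList = ['9'] := by decide
  have hc0 : ("0" : String).toList = ['0'] := by decide
  unfold solution
  rw [pyRange_ten]
  simp only [List.foldl_cons, List.foldl_nil, List.nil_append,
    PySem.Str.count_eq, ht0, ht1, ht2, ht3, ht4, ht5, ht6, ht7, ht8, ht9, hc0,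
    chars_count_single, PySem.List.pyRepeat_singleton, min_natCast_toNat, blocksOf,
    List.append_nil, List.append_assoc]

-- every char between '0' and '9' is one of the ten digit characters
theorem digit_cases (c : Char) (h : '0' ≤ c ∧ c ≤ '9') :
    c ∈ (['9','8','7','6','5','4','3','2','1','0'] : List Char) := by
  obtain ⟨h1, h2⟩ := h
  rw [Char.le_def] at h1 h2
  have hb : 48 ≤ c.val.toNat ∧ c.val.toNat ≤ 57 := ⟨h1, h2⟩
  have he : ∀ (d : Char), c.val.toNat = d.val.toNat → c = d := by
    intro d hd
    apply Char.ext
    exact UInt32.toNat_inj.mp hd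
  have : c.val.toNat = 48 ∨ c.val.toNat = 49 ∨ c.val.toNat = 50 ∨ c.val.toNat = 51 ∨
      c.val.toNat = 52 ∨ c.val.toNat = 53 ∨ c.val.toNat = 54 ∨ c.val.toNat = 55 ∨
      c.val.toNat = 56 ∨ c.val.toNat = 57 := by omega
  rcases this with h|h|h|h|h|h|h|h|h|h
  · simp [he '0' (by rw [h]; rfl)]
  · simp [he '1' (by rw [h]; rfl)]
  · simp [he '2' (by rw [h]; rfl)]
  · simp [he '3' (by rw [h]; rfl)]
  · simp [he '4' (by rw [h]; rfl)]
  · simp [he '5' (by rw [h]; rfl)]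
  · simp [he '6' (by rw [h]; rfl)]
  · simp [he '7' (by rw [h]; rfl)]
  · simp [he '8' (by rw [h]; rfl)]
  · simp [he '9' (by rw [h]; rfl)]

theorem count_blocksOf (ds : List Char) (hnd : ds.Nodup) (f : Char → Nat) (a : Char) :
    (blocksOf ds f).count a = if a ∈ ds then f a else 0 := by
  induction ds with
  | nil => simp [blocksOf]
  | cons c ds ih =>
    rw [List.nodup_cons] at hnd
    simp only [blocksOf, List.count_append, List.count_replicate, ih hnd.2]
    by_cases hac : a = c
    · subst hac
      simp [hnd.1]
    · simp [hac, List.mem_cons, Ne.symm hac]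

theorem pairwise_rep {r : Char → Char → Prop} (c : Char) (hr : r c c) (n : Nat) :
    (List.replicate n c).Pairwise r := by
  induction n with
  | zero => simp
  | succ m ih =>
    rw [List.replicate_succ, List.pairwise_cons]
    exact ⟨fun b hb => (List.eq_of_mem_replicate hb) ▸ hr, ih⟩

theorem pairwise_blocksOf (ds : List Char) (hd : ds.Pairwise (fun a b => b < a)) (f : Char → Nat) :
    (blocksOf ds f).Pairwise (fun a b => b ≤ a) := by
  induction ds with
  | nil => simp [blocksOf]
  | cons c ds ih =>
    rw [List.pairwise_cons] at hd
    rw [blocksOf, List.pairwise_append]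
    refine ⟨pairwise_rep (r := fun a b => b ≤ a) c le_rfl _, ih hd.2, ?_⟩
    intro a ha b hb
    rw [List.eq_of_mem_replicate ha]
    exact le_of_lt (hd.1 b (mem_blocksOf hb))

theorem digit_mem_ds {a : Char} (h : a ∈ (['9','8','7','6','5','4','3','2','1','0'] : List Char)) :
    '0' ≤ a ∧ a ≤ '9' := by
  fin_cases h <;> exact ⟨by decide, by decide⟩

-- the two-pointer merge skips leading copies of c on the right when the left is all below c
theorem merge_drop_right (c : Char) (xs' : List Char) (hx : ∀ x ∈ xs', x < c) :
    ∀ (b : Nat) (ys' : List Char),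
      pvMergeInter xs' (List.replicate b c ++ ys') = pvMergeInter xs' ys' := by
  intro b
  induction b with
  | zero => intro ys'; simp
  | succ n ih =>
    intro ys'
    cases xs' with
    | nil => simp [pvMergeInter]
    | cons x t =>
      have hxc : x < c := hx x List.mem_cons_self
      rw [List.replicate_succ, List.cons_append]
      rw [show pvMergeInter (x :: t) (c :: (List.replicate n c ++ ys'))
          = pvMergeInter (x :: t) (List.replicate n c ++ ys') from by
        rw [pvMergeInter]
        rw [if_neg (by exact fun h => absurd (h ▸ hxc) (lt_irrefl c)),
            if_neg (by exact fun h => absurd (lt_trans h hxc) (lt_irrefl c))]]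
      exact ih ys'

theorem merge_drop_left (c : Char) (ys' : List Char) (hy : ∀ y ∈ ys', y < c) :
    ∀ (a : Nat) (xs' : List Char),
      pvMergeInter (List.replicate a c ++ xs') ys' = pvMergeInter xs' ys' := by
  intro a
  induction a with
  | zero => intro xs'; simp
  | succ n ih =>
    intro xs'
    cases ys' with
    | nil =>
      have h1 : ∀ (l : List Char), pvMergeInter l [] = [] := by
        intro l; cases l <;> simp [pvMergeInter]
      rw [h1, h1]
    | cons y t =>
      have hyc : y < c := hy y List.mem_cons_self
      rw [List.replicate_succ, List.cons_append]
      rw [show pvMergeInter (c :: (List.replicate n c ++ xs')) (y :: t)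
          = pvMergeInter (List.replicate n c ++ xs') (y :: t) from by
        rw [pvMergeInter]
        rw [if_neg (by exact fun h => absurd (h ▸ hyc) (lt_irrefl c)), if_pos hyc]]
      exact ih xs'

-- equal leading blocks of c merge into a block of the minimum
theorem merge_rep (c : Char) (xs' ys' : List Char)
    (hx : ∀ x ∈ xs', x < c) (hy : ∀ y ∈ ys', y < c) :
    ∀ (a b : Nat),
      pvMergeInter (List.replicate a c ++ xs') (List.replicate b c ++ ys')
      = List.replicate (min a b) c ++ pvMergeInter xs' ys' := by
  intro a
  induction a with
  | zero => intro b; simpa using merge_drop_right c xs' hx b ys'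
  | succ n ih =>
    intro b
    cases b with
    | zero => simpa using merge_drop_left c ys' hy (n+1) xs'
    | succ m =>
      rw [List.replicate_succ, List.replicate_succ, List.cons_append, List.cons_append]
      rw [show pvMergeInter (c :: (List.replicate n c ++ xs')) (c :: (List.replicate m c ++ ys'))
          = c :: pvMergeInter (List.replicate n c ++ xs') (List.replicate m c ++ ys') from by
        rw [pvMergeInter, if_pos rfl]]
      rw [ih m]
      rw [show min (n+1) (m+1) = min n m + 1 by omega]
      rw [List.replicate_succ, List.cons_append]

-- merging two block lists over the same strictly-descending digit list takes per-digit minima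
theorem merge_blocksOf (ds : List Char) (hd : ds.Pairwise (fun a b => b < a)) (f g : Char → Nat) :
    pvMergeInter (blocksOf ds f) (blocksOf ds g)
    = blocksOf ds (fun c => min (f c) (g c)) := by
  induction ds with
  | nil => simp [blocksOf, pvMergeInter]
  | cons c ds ih =>
    rw [List.pairwise_cons] at hd
    have hlt : ∀ x ∈ ds, x < c := hd.1
    simp only [blocksOf]
    rw [merge_rep c _ _ (fun x hx => hlt x (mem_blocksOf hx)) (fun y hy => hlt y (mem_blocksOf hy))]
    rw [ih hd.2]

-- descending sort of the kept digits is the descending block list of the counts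
theorem sorted_desc_blocks (l : List Char) :
    PySem.List.sorted (l.filter fun c => decide ('0' ≤ c ∧ c ≤ '9')) (fun c => c) true
    = blocksOf ['9','8','7','6','5','4','3','2','1','0'] (fun c => l.count c) := by
  have hperm : (blocksOf ['9','8','7','6','5','4','3','2','1','0'] (fun c => l.count c)).Perm
      (l.filter fun c => decide ('0' ≤ c ∧ c ≤ '9')) := by
    rw [List.perm_iff_count]
    intro a
    rw [count_blocksOf _ (by decide)]
    by_cases ha : a ∈ (['9','8','7','6','5','4','3','2','1','0'] : List Char)
    · rw [if_pos ha]
      have hd := digit_mem_ds ha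
      rw [List.count_filter (by simpa using hd)]
    · rw [if_neg ha]
      symm
      rw [List.count_eq_zero]
      intro hmem
      exact ha (digit_cases a (by simpa using (List.of_mem_filter hmem)))
  have hs1 := PySem.List.sorted_pairwise_rev (l.filter fun c => decide ('0' ≤ c ∧ c ≤ '9')) (fun c => c)
  have hp1 := PySem.List.sorted_perm (l.filter fun c => decide ('0' ≤ c ∧ c ≤ '9')) (fun c => c) true
  have hs2 := pairwise_blocksOf ['9','8','7','6','5','4','3','2','1','0'] (by decide) (fun c => l.count c)
  exact (hp1.trans hperm.symm).eq_of_pairwise (fun a b _ _ h1 h2 => le_antisymm h2 h1) hs1 hs2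

theorem key_gen (n0 n1 n2 n3 n4 n5 n6 n7 n8 n9 : Nat) :
    (if (List.replicate n0 '0' ++ List.replicate n1 '1' ++ List.replicate n2 '2' ++
         List.replicate n3 '3' ++ List.replicate n4 '4' ++ List.replicate n5 '5' ++
         List.replicate n6 '6' ++ List.replicate n7 '7' ++ List.replicate n8 '8' ++
         List.replicate n9 '9') = [] then "-1"
     else if (List.replicate n0 '0' ++ List.replicate n1 '1' ++ List.replicate n2 '2' ++
         List.replicate n3 '3' ++ List.replicate n4 '4' ++ List.replicate n5 '5' ++
         List.replicate n6 '6' ++ List.replicate n7 '7' ++ List.replicate n8 '8' ++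
         List.replicate n9 '9').count '0' =
        (List.replicate n0 '0' ++ List.replicate n1 '1' ++ List.replicate n2 '2' ++
         List.replicate n3 '3' ++ List.replicate n4 '4' ++ List.replicate n5 '5' ++
         List.replicate n6 '6' ++ List.replicate n7 '7' ++ List.replicate n8 '8' ++
         List.replicate n9 '9').length then "0"
     else String.ofList (List.replicate n0 '0' ++ List.replicate n1 '1' ++ List.replicate n2 '2' ++
         List.replicate n3 '3' ++ List.replicate n4 '4' ++ List.replicate n5 '5' ++
         List.replicate n6 '6' ++ List.replicate n7 '7' ++ List.replicate n8 '8' ++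
         List.replicate n9 '9').reverse)
    =
    (match (List.replicate n9 '9' ++ List.replicate n8 '8' ++ List.replicate n7 '7' ++
         List.replicate n6 '6' ++ List.replicate n5 '5' ++ List.replicate n4 '4' ++
         List.replicate n3 '3' ++ List.replicate n2 '2' ++ List.replicate n1 '1' ++
         List.replicate n0 '0') with
     | [] => "-1"
     | c :: _ => if c = '0' then "0"
                 else String.ofList (List.replicate n9 '9' ++ List.replicate n8 '8' ++
         List.replicate n7 '7' ++ List.replicate n6 '6' ++ List.replicate n5 '5' ++
         List.replicate n4 '4' ++ List.replicate n3 '3' ++ List.replicate n2 '2' ++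
         List.replicate n1 '1' ++ List.replicate n0 '0')) := by
  by_cases hz : n1 + n2 + n3 + n4 + n5 + n6 + n7 + n8 + n9 = 0
  · obtain ⟨h1, h2, h3, h4, h5, h6, h7, h8, h9⟩ :
        n1 = 0 ∧ n2 = 0 ∧ n3 = 0 ∧ n4 = 0 ∧ n5 = 0 ∧ n6 = 0 ∧ n7 = 0 ∧ n8 = 0 ∧ n9 = 0 := by omega
    subst h1 h2 h3 h4 h5 h6 h7 h8 h9
    simp only [List.replicate_zero, List.append_nil, List.nil_append]
    cases n0 with
    | zero => simp
    | succ k =>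
      have hne : List.replicate (k+1) '0' ≠ [] := by simp
      rw [if_neg hne, if_pos (by simp), List.replicate_succ]
      rfl
  · have hane : (List.replicate n0 '0' ++ List.replicate n1 '1' ++ List.replicate n2 '2' ++
         List.replicate n3 '3' ++ List.replicate n4 '4' ++ List.replicate n5 '5' ++
         List.replicate n6 '6' ++ List.replicate n7 '7' ++ List.replicate n8 '8' ++
         List.replicate n9 '9') ≠ [] := by
      intro h
      have := congrArg List.length h
      simp at this
      omega
    have hcnt : ¬ ((List.replicate n0 '0' ++ List.replicate n1 '1' ++ List.replicate n2 '2' ++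
         List.replicate n3 '3' ++ List.replicate n4 '4' ++ List.replicate n5 '5' ++
         List.replicate n6 '6' ++ List.replicate n7 '7' ++ List.replicate n8 '8' ++
         List.replicate n9 '9').count '0' =
        (List.replicate n0 '0' ++ List.replicate n1 '1' ++ List.replicate n2 '2' ++
         List.replicate n3 '3' ++ List.replicate n4 '4' ++ List.replicate n5 '5' ++
         List.replicate n6 '6' ++ List.replicate n7 '7' ++ List.replicate n8 '8' ++
         List.replicate n9 '9').length) := by
      simp [List.count_append, List.count_replicate]
      omega
    rw [if_neg hane, if_neg hcnt]
    -- the descending list starts with a nonzero digit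
    have hT : (List.replicate n9 '9' ++ List.replicate n8 '8' ++ List.replicate n7 '7' ++
         List.replicate n6 '6' ++ List.replicate n5 '5' ++ List.replicate n4 '4' ++
         List.replicate n3 '3' ++ List.replicate n2 '2' ++ List.replicate n1 '1')
        ≠ ([] : List Char) := by
      intro h
      have := congrArg List.length h
      simp at this
      omega
    obtain ⟨t0, T', hT'⟩ : ∃ t0 T', (List.replicate n9 '9' ++ List.replicate n8 '8' ++
         List.replicate n7 '7' ++ List.replicate n6 '6' ++ List.replicate n5 '5' ++
         List.replicate n4 '4' ++ List.replicate n3 '3' ++ List.replicate n2 '2' ++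
         List.replicate n1 '1') = t0 :: T' := by
      cases h : (List.replicate n9 '9' ++ List.replicate n8 '8' ++
         List.replicate n7 '7' ++ List.replicate n6 '6' ++ List.replicate n5 '5' ++
         List.replicate n4 '4' ++ List.replicate n3 '3' ++ List.replicate n2 '2' ++
         List.replicate n1 '1') with
      | nil => exact absurd h hT
      | cons a b => exact ⟨a, b, rfl⟩
    have ht0 : t0 ≠ '0' := by
      have hm : t0 ∈ (List.replicate n9 '9' ++ List.replicate n8 '8' ++
         List.replicate n7 '7' ++ List.replicate n6 '6' ++ List.replicate n5 '5' ++
         List.replicate n4 '4' ++ List.replicate n3 '3' ++ List.replicate n2 '2' ++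
         List.replicate n1 '1') := by rw [hT']; exact List.mem_cons_self
      simp only [List.mem_append, List.mem_replicate] at hm
      rcases hm with ((((((((⟨-, rfl⟩|⟨-, rfl⟩)|⟨-, rfl⟩)|⟨-, rfl⟩)|⟨-, rfl⟩)|⟨-, rfl⟩)|⟨-, rfl⟩)|⟨-, rfl⟩)|⟨-, rfl⟩) <;> decide
    have hdesc : (List.replicate n9 '9' ++ List.replicate n8 '8' ++ List.replicate n7 '7' ++
         List.replicate n6 '6' ++ List.replicate n5 '5' ++ List.replicate n4 '4' ++
         List.replicate n3 '3' ++ List.replicate n2 '2' ++ List.replicate n1 '1' ++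
         List.replicate n0 '0') = t0 :: (T' ++ List.replicate n0 '0') := by
      conv_lhs => rw [show (List.replicate n9 '9' ++ List.replicate n8 '8' ++ List.replicate n7 '7' ++
         List.replicate n6 '6' ++ List.replicate n5 '5' ++ List.replicate n4 '4' ++
         List.replicate n3 '3' ++ List.replicate n2 '2' ++ List.replicate n1 '1' ++
         List.replicate n0 '0') = (List.replicate n9 '9' ++ List.replicate n8 '8' ++
         List.replicate n7 '7' ++ List.replicate n6 '6' ++ List.replicate n5 '5' ++
         List.replicate n4 '4' ++ List.replicate n3 '3' ++ List.replicate n2 '2' ++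
         List.replicate n1 '1') ++ List.replicate n0 '0' from by simp [List.append_assoc]]
      rw [hT']
      rfl
    rw [hdesc]
    simp only [if_neg ht0]
    rw [← hdesc]
    congr 1
    simp [List.reverse_append, List.reverse_replicate, List.append_assoc]

-- the final three-way branch: ascending form (A) vs descending form (B)
theorem key (f : Char → Nat) :
    (let answer := blocksOf ['0','1','2','3','4','5','6','7','8','9'] f
     if answer = [] then "-1"
     else if answer.count '0' = answer.length then "0"
     else String.ofList answer.reverse)
    =
    (match blocksOf ['9','8','7','6','5','4','3','2','1','0'] f with
     | [] => "-1"
     | c :: _ => if c = '0' then "0"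
                 else String.ofList (blocksOf ['9','8','7','6','5','4','3','2','1','0'] f)) := by
  simp only [blocksOf, List.append_nil]
  simp only [← List.append_assoc]
  exact key_gen (f '0') (f '1') (f '2') (f '3') (f '4') (f '5') (f '6') (f '7') (f '8') (f '9')

-- B's result, written over the same block lists
theorem solution_alt_eq (X Y : String) :
    solution_alt X Y =
    (match blocksOf ['9','8','7','6','5','4','3','2','1','0']
        (fun c => min (X.toList.count c) (Y.toList.count c)) with
     | [] => "-1"
     | c :: _ => if c = '0' then "0"
                 else String.ofList (blocksOf ['9','8','7','6','5','4','3','2','1','0']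
                    (fun c => min (X.toList.count c) (Y.toList.count c)))) := by
  show (match pvMergeInter
      (PySem.List.sorted (X.toList.filter fun c => decide ('0' ≤ c ∧ c ≤ '9')) (fun c => c) true)
      (PySem.List.sorted (Y.toList.filter fun c => decide ('0' ≤ c ∧ c ≤ '9')) (fun c => c) true) with
    | [] => "-1"
    | c :: _ => if c = '0' then "0"
                else String.ofList (pvMergeInter
      (PySem.List.sorted (X.toList.filter fun c => decide ('0' ≤ c ∧ c ≤ '9')) (fun c => c) true)
      (PySem.List.sorted (Y.toList.filter fun c => decide ('0' ≤ c ∧ c ≤ '9')) (fun c => c) true))) = _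
  rw [sorted_desc_blocks X.toList, sorted_desc_blocks Y.toList]
  rw [merge_blocksOf _ (by decide)]

-- ===== VERDICT (by name: the statement is the Claim_ definition above) =====
theorem solution_spec : Claim_equal_solution := by
  intro X Y _
  unfold Spec_solution
  rw [solution_eq, solution_alt_eq]
  exact key _
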